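-- pv_equiv track=rewrite | github.com/zxxia/benchmarking | feature_scan/features.py | compute_arrival_rate
-- ===== SOURCE A (Python) =====
-- def object_appearance(start, end, gt):
--     """Retun object life span and frames' new object information.
--
--     Return
--         object to frame range (dict)
--         frame id to a list of new object id (dict)
--
--     """
--     obj_to_frame_range = dict()
--     frame_to_new_obj = dict()
--     for frame_id in range(start, end+1):
--         if frame_id not in gt:
--             continue
--         boxes = gt[frame_id]
--         for box in boxes:
--             try:
--                 obj_id = int(box[-1])
--             except ValueError:
--                 obj_id = box[-1]
--
--             if obj_id in obj_to_frame_range: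
--                 start, end = obj_to_frame_range[obj_id]
--                 obj_to_frame_range[obj_id][0] = min(int(frame_id), start)
--                 obj_to_frame_range[obj_id][1] = max(int(frame_id), end)
--             else:
--                 obj_to_frame_range[obj_id] = [int(frame_id), int(frame_id)]
--
--     for obj_id in obj_to_frame_range:
--         if obj_to_frame_range[obj_id][0] in frame_to_new_obj:
--             frame_to_new_obj[obj_to_frame_range[obj_id][0]].append(obj_id)
--         else:
--             frame_to_new_obj[obj_to_frame_range[obj_id][0]] = [obj_id]
--
--     return obj_to_frame_range, frame_to_new_obj
--
-- def compute_arrival_rate(video_dets, start, end, fps):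
--     """Compuate new object arrival rate.
--
--     Arrival rate defines as the number of new objects arrive in the following
--     second starting from the current frame.
--
--     Args
--         fps: frames per second
--
--     """
--     obj_to_frame_range, frame_to_new_obj = object_appearance(
--         start, end, video_dets)
--     arrival_rate = {}
--     for i in range(start, end + 1):
--         one_second_events = 0
--         if i > end - fps:
--             arrival_rate[i] = arrival_rate[i - 1]
--         for j in range(i, i + fps):
--             if j not in frame_to_new_obj:
--                 continue
--             else:
--                 one_second_events += len(frame_to_new_obj[j])
--         arrival_rate[i] = one_second_events
--
--     return arrival_rate
-- ===== SOURCE B (Python) =====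
-- def compute_arrival_rate(video_dets, start, end, fps):
--     """New-object arrival rate via per-frame first-appearance counts and a
--     prefix-sum array, instead of re-scanning an fps-wide window per frame."""
--     if start > end:
--         return {}
--     n = end - start + 1
--     first_seen = {}
--     for f in range(start, end + 1):
--         if f in video_dets:
--             for box in video_dets[f]:
--                 oid = box[-1]
--                 if oid not in first_seen:
--                     first_seen[oid] = f
--     cnt = [0] * n
--     for f in first_seen.values():
--         cnt[f - start] += 1
--     pre = [0] * (n + 1)
--     for k in range(n):
--         pre[k + 1] = pre[k] + cnt[k]
--     return {i: pre[max(i, min(i + fps, end + 1)) - start] - pre[i - start]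
--             for i in range(start, end + 1)}
-- ===== Notes on version B (the rewrite author's own statement) =====
-- stated objective: faster
-- what changed: B replaces A's per-frame rescan of the next fps frames (via the obj_to_frame_range/frame_to_new_obj dicts) with a single pass recording each object's first frame, a per-frame count array and a prefix-sum array, so each arrival-rate entry is one subtraction instead of an fps-wide inner loop.
import Mathlib
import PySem

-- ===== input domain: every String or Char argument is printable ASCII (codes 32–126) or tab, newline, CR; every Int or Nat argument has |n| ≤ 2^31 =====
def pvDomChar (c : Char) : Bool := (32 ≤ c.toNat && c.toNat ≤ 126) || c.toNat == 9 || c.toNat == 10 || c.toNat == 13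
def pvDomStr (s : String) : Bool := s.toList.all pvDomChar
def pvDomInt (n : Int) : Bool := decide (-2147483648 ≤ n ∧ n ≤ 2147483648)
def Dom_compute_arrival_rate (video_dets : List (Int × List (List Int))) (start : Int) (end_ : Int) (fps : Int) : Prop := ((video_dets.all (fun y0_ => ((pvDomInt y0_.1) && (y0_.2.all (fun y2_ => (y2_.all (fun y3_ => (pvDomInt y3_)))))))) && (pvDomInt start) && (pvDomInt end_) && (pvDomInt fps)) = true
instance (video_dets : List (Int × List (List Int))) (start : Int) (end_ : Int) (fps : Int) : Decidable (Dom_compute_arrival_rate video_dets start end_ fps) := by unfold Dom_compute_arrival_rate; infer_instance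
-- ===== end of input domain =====

-- B replaces A's fps-wide inner rescan per frame by first-appearance counts plus a
-- prefix-sum array (one pass over the frames, one subtraction per output entry).

-- ===== PORT A =====
-- int(box[-1]) with its ValueError fallback is the identity here (box entries are Int);
-- box[-1] on an empty box is Python's IndexError, excluded by Pre_ (default 0 never matters inside Pre_).
def pvA_updBox (frame_id : Int) (d : PySem.Dict Int (List Int)) (box : List Int) : PySem.Dict Int (List Int) :=
  let obj_id := PySem.List.pyGetD box (-1) 0
  match d.get? obj_id with
  | some v =>
      -- start, end = obj_to_frame_range[obj_id]; then two item assignments on that list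
      let s := PySem.List.pyGetD v 0 0
      let e := PySem.List.pyGetD v 1 0
      let d1 := d.insert obj_id (PySem.List.pySetD v 0 (min frame_id s))
      d1.insert obj_id (PySem.List.pySetD (d1.getD obj_id []) 1 (max frame_id e))
  | none => d.insert obj_id [frame_id, frame_id]

def pvA_frame (gt : PySem.Dict Int (List (List Int))) (d : PySem.Dict Int (List Int)) (frame_id : Int) : PySem.Dict Int (List Int) :=
  match gt.get? frame_id with
  | none => d
  | some boxes => boxes.foldl (pvA_updBox frame_id) d

def compute_arrival_rate (video_dets : List (Int × List (List Int))) (start : Int) (end_ : Int) (fps : Int) : List (Int × Int) :=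
  let gt := PySem.Dict.ofList video_dets
  -- object_appearance: obj_to_frame_range
  let otfr := (PySem.List.pyRange start (end_ + 1) 1).foldl (pvA_frame gt) PySem.Dict.empty
  -- object_appearance: frame_to_new_obj
  let ftno := otfr.keys.foldl (fun d obj_id =>
      let f := PySem.List.pyGetD (otfr.getD obj_id []) 0 0
      if d.contains f then d.insert f (d.getD f [] ++ [obj_id])
      else d.insert f [obj_id]) (PySem.Dict.empty : PySem.Dict Int (List Int))
  -- arrival_rate loop; arrival_rate[i] = arrival_rate[i-1] raises KeyError when i-1 is
  -- missing (exactly start ≤ end ∧ end - start < fps), excluded by Pre_; getD 0 is the total form.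
  let ar := (PySem.List.pyRange start (end_ + 1) 1).foldl (fun ar i =>
      let ar1 := if i > end_ - fps then ar.insert i (ar.getD (i - 1) 0) else ar
      let s := (PySem.List.pyRange i (i + fps) 1).foldl (fun acc j =>
          match ftno.get? j with
          | none => acc
          | some l => acc + PySem.List.len l) 0
      ar1.insert i s) (PySem.Dict.empty : PySem.Dict Int Int)
  ar.items

-- ===== PORT B =====
def pvB_box (f : Int) (fs : PySem.Dict Int Int) (box : List Int) : PySem.Dict Int Int :=
  let oid := PySem.List.pyGetD box (-1) 0
  if fs.contains oid then fs else fs.insert oid f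

def pvB_frame (gt : PySem.Dict Int (List (List Int))) (fs : PySem.Dict Int Int) (f : Int) : PySem.Dict Int Int :=
  if gt.contains f then (gt.getD f []).foldl (pvB_box f) fs else fs

def compute_arrival_rate_alt (video_dets : List (Int × List (List Int))) (start : Int) (end_ : Int) (fps : Int) : List (Int × Int) :=
  if start > end_ then []
  else
    let gt := PySem.Dict.ofList video_dets
    let n := end_ - start + 1
    let fs := (PySem.List.pyRange start (end_ + 1) 1).foldl (pvB_frame gt) PySem.Dict.empty
    let cnt := fs.values.foldl (fun c f =>
        PySem.List.pySetD c (f - start) (PySem.List.pyGetD c (f - start) 0 + 1))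
        (List.replicate n.toNat (0 : Int))
    let pre := (PySem.List.pyRange 0 n 1).foldl (fun p k =>
        PySem.List.pySetD p (k + 1) (PySem.List.pyGetD p k 0 + PySem.List.pyGetD cnt k 0))
        (List.replicate (n + 1).toNat (0 : Int))
    (PySem.List.pyRange start (end_ + 1) 1).map (fun i =>
      (i, PySem.List.pyGetD pre (max i (min (i + fps) (end_ + 1)) - start) 0
          - PySem.List.pyGetD pre (i - start) 0))

-- ===== PRECONDITION & SPEC =====
-- Pre_ excludes exactly the inputs where A raises: KeyError (start ≤ end_ ∧ end_ - start < fps,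
-- reading arrival_rate[start-1]) and IndexError (an empty box in a frame inside [start, end_]).
def Pre_compute_arrival_rate (video_dets : List (Int × List (List Int))) (start : Int) (end_ : Int) (fps : Int) : Prop :=
  (start ≤ end_ → fps ≤ end_ - start) ∧
  ∀ p ∈ (PySem.Dict.ofList video_dets).items, start ≤ p.1 → p.1 ≤ end_ → ∀ b ∈ p.2, b ≠ []
instance (video_dets : List (Int × List (List Int))) (start : Int) (end_ : Int) (fps : Int) : Decidable (Pre_compute_arrival_rate video_dets start end_ fps) := by unfold Pre_compute_arrival_rate; infer_instance

def pvWitness_compute_arrival_rate : (List (Int × List (List Int))) × Int × Int × Int :=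
  ([(0, [[1, 1, 5]]), (2, [[1, 2, 5], [0, 0, 7]])], 0, 4, 2)

def Spec_compute_arrival_rate (video_dets : List (Int × List (List Int))) (start : Int) (end_ : Int) (fps : Int) (out : List (Int × Int)) : Prop := out = compute_arrival_rate_alt video_dets start end_ fps
instance (video_dets : List (Int × List (List Int))) (start : Int) (end_ : Int) (fps : Int) (out : List (Int × Int)) : Decidable (Spec_compute_arrival_rate video_dets start end_ fps out) := by unfold Spec_compute_arrival_rate; infer_instance

-- ===== CLAIM (what is proved, stated in full; the proofs are below) =====
def Claim_equal_compute_arrival_rate : Prop := ∀ (video_dets : List (Int × List (List Int))) (start : Int) (end_ : Int) (fps : Int), Dom_compute_arrival_rate video_dets start end_ fps → Pre_compute_arrival_rate video_dets start end_ fps → Spec_compute_arrival_rate video_dets start end_ fps (compute_arrival_rate video_dets start end_ fps)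
-- ===== LEMMAS AND PROOFS =====

-- the projection relating A's [first, last] entries to B's first-seen entries
def pvProj (p : Int × List Int) : Int × Int := (p.1, PySem.List.pyGetD p.2 0 0)

-- one entry per key: two items with the same key have the same value (keys Nodup)
lemma pv_item_unique {ν : Type} (d : PySem.Dict Int ν) (hn : d.keys.Nodup)
    {p : Int × ν} {v : ν} (hp : p ∈ d.items) (hv : (p.1, v) ∈ d.items) : p.2 = v := by
  have h1 := PySem.Dict.getD_of_mem_items d (k := p.1) (v := p.2) (by simpa using hp) hn v
  have h2 := PySem.Dict.getD_of_mem_items d (k := p.1) (v := v) hv hn v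
  rw [h1] at h2
  exact h2

lemma pv_contains_eq_of_proj {d1 : PySem.Dict Int (List Int)} {d2 : PySem.Dict Int Int}
    (h : d1.items.map pvProj = d2.items) (k : Int) : d2.contains k = d1.contains k := by
  rw [PySem.Dict.contains_eq_decide_mem_keys, PySem.Dict.contains_eq_decide_mem_keys]
  have : d2.keys = d1.keys := by
    simp only [PySem.Dict.keys, ← h, List.map_map]
    rfl
  rw [this]

lemma pv_box_fold (f start0 : Int) (hs : start0 ≤ f) (boxes : List (List Int)) :
    ∀ (d1 : PySem.Dict Int (List Int)) (d2 : PySem.Dict Int Int),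
    d1.keys.Nodup →
    d1.items.map pvProj = d2.items →
    (∀ p ∈ d1.items, ∃ x y : Int, p.2 = [x, y] ∧ start0 ≤ x ∧ x ≤ y ∧ y ≤ f) →
    (boxes.foldl (pvA_updBox f) d1).keys.Nodup ∧
    (boxes.foldl (pvA_updBox f) d1).items.map pvProj = (boxes.foldl (pvB_box f) d2).items ∧
    (∀ p ∈ (boxes.foldl (pvA_updBox f) d1).items,
       ∃ x y : Int, p.2 = [x, y] ∧ start0 ≤ x ∧ x ≤ y ∧ y ≤ f) := by
  induction boxes with
  | nil => intro d1 d2 h0 h1 h2; exact ⟨h0, h1, h2⟩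
  | cons box bs ih =>
    intro d1 d2 h0 h1 h2
    simp only [List.foldl_cons]
    set oid := PySem.List.pyGetD box (-1) 0 with hoid
    have hcont : d2.contains oid = d1.contains oid := pv_contains_eq_of_proj h1 oid
    cases hg : d1.get? oid with
    | some v =>
      have hc1 : d1.contains oid = true := by
        rw [PySem.Dict.contains_eq_isSome_get?, hg]; rfl
      have hmem : (oid, v) ∈ d1.items := PySem.Dict.mem_items_of_get?_eq_some d1 hg
      obtain ⟨x, y, hv, hx0, hxy, hyf⟩ := h2 _ hmem
      simp only at hv
      have hA : pvA_updBox f d1 box = (d1.insert oid [x, y]).insert oid [x, f] := by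
        simp only [pvA_updBox, ← hoid, hg, hv]
        have e0 : PySem.List.pyGetD [x, y] 0 0 = x := rfl
        have e1 : PySem.List.pyGetD [x, y] 1 0 = y := rfl
        have es0 : PySem.List.pySetD [x, y] 0 (min f x) = [min f x, y] := rfl
        rw [e0, e1, es0, min_eq_right (by omega : x ≤ f)]
        rw [PySem.Dict.getD_insert_self]
        have es1 : PySem.List.pySetD [x, y] 1 (max f y) = [x, max f y] := rfl
        rw [es1, max_eq_left (by omega : y ≤ f)]
      have hB : pvB_box f d2 box = d2 := by
        simp only [pvB_box, ← hoid, hcont, hc1, if_true]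
      rw [hA, hB]
      have hcont1 : (d1.insert oid [x, y]).contains oid = true :=
        PySem.Dict.contains_insert_self d1 oid [x, y]
      have hitems : ((d1.insert oid [x, y]).insert oid [x, f]).items
          = d1.items.map (fun p => if p.1 == oid then (oid, ([x, f] : List Int)) else p) := by
        rw [PySem.Dict.items_insert_of_contains _ _ hcont1,
          PySem.Dict.items_insert_of_contains _ _ hc1, List.map_map]
        refine List.map_congr_left ?_
        intro p _
        by_cases hp : p.1 = oid <;> simp [hp]
      have hnod' : ((d1.insert oid [x, y]).insert oid [x, f]).keys.Nodup :=
        PySem.Dict.nodup_keys_insert _ _ _ (PySem.Dict.nodup_keys_insert _ _ _ h0)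
      have hproj' : ((d1.insert oid [x, y]).insert oid [x, f]).items.map pvProj = d2.items := by
        rw [hitems, List.map_map, ← h1]
        refine List.map_congr_left ?_
        intro p hp
        by_cases hpo : p.1 = oid
        · have hv2 : p.2 = v := pv_item_unique d1 h0 hp (by rw [hpo]; exact hmem)
          simp [pvProj, hpo, hv2, hv, PySem.List.pyGetD_zero_cons]
        · simp [pvProj, hpo]
      have hvals' : ∀ p ∈ ((d1.insert oid [x, y]).insert oid [x, f]).items,
          ∃ a b : Int, p.2 = [a, b] ∧ start0 ≤ a ∧ a ≤ b ∧ b ≤ f := by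
        intro p hp
        rw [hitems] at hp
        obtain ⟨q, hq, hqe⟩ := List.mem_map.mp hp
        by_cases hqo : q.1 == oid
        · rw [if_pos hqo] at hqe
          exact ⟨x, f, by rw [← hqe], hx0, by omega, le_refl f⟩
        · rw [if_neg (by simpa using hqo)] at hqe
          exact hqe ▸ h2 q hq
      exact ih _ _ hnod' hproj' hvals'
    | none =>
      have hc1 : d1.contains oid = false := by
        rw [PySem.Dict.contains_eq_isSome_get?, hg]; rfl
      have hA : pvA_updBox f d1 box = d1.insert oid [f, f] := by
        simp only [pvA_updBox, ← hoid, hg]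
      have hB : pvB_box f d2 box = d2.insert oid f := by
        simp only [pvB_box, ← hoid, hcont, hc1, if_false, Bool.false_eq_true]
      rw [hA, hB]
      have hnod' : (d1.insert oid [f, f]).keys.Nodup :=
        PySem.Dict.nodup_keys_insert _ _ _ h0
      have hproj' : (d1.insert oid [f, f]).items.map pvProj = (d2.insert oid f).items := by
        rw [PySem.Dict.items_insert_of_not_contains _ _ hc1,
          PySem.Dict.items_insert_of_not_contains _ _ (by rw [hcont]; exact hc1),
          List.map_append, h1]
        rfl
      have hvals' : ∀ p ∈ (d1.insert oid [f, f]).items,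
          ∃ a b : Int, p.2 = [a, b] ∧ start0 ≤ a ∧ a ≤ b ∧ b ≤ f := by
        intro p hp
        rw [PySem.Dict.items_insert_of_not_contains _ _ hc1] at hp
        rcases List.mem_append.mp hp with hp | hp
        · exact h2 p hp
        · obtain rfl : p = (oid, [f, f]) := List.mem_singleton.mp hp
          exact ⟨f, f, rfl, hs, le_refl f, le_refl f⟩
      exact ih _ _ hnod' hproj' hvals'

lemma pv_frames_fold (gt : PySem.Dict Int (List (List Int))) (start0 : Int) :
    ∀ (k : Nat) (a : Int) (d1 : PySem.Dict Int (List Int)) (d2 : PySem.Dict Int Int),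
    start0 ≤ a →
    d1.keys.Nodup →
    d1.items.map pvProj = d2.items →
    (∀ p ∈ d1.items, ∃ x y : Int, p.2 = [x, y] ∧ start0 ≤ x ∧ x ≤ y ∧ y < a) →
    ((PySem.List.pyRange a (a + k) 1).foldl (pvA_frame gt) d1).keys.Nodup ∧
    ((PySem.List.pyRange a (a + k) 1).foldl (pvA_frame gt) d1).items.map pvProj
      = ((PySem.List.pyRange a (a + k) 1).foldl (pvB_frame gt) d2).items ∧
    (∀ p ∈ ((PySem.List.pyRange a (a + k) 1).foldl (pvA_frame gt) d1).items,
       ∃ x y : Int, p.2 = [x, y] ∧ start0 ≤ x ∧ x ≤ y ∧ y < a + k) := by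
  intro k
  induction k with
  | zero =>
    intro a d1 d2 ha h0 h1 h2
    rw [PySem.List.pyRange_one_eq_nil (by simp)]
    exact ⟨h0, h1, by simpa using h2⟩
  | succ k ih =>
    intro a d1 d2 ha h0 h1 h2
    rw [PySem.List.pyRange_one_cons (by push_cast; omega)]
    simp only [List.foldl_cons]
    have hstep : (pvA_frame gt d1 a).keys.Nodup ∧
        (pvA_frame gt d1 a).items.map pvProj = (pvB_frame gt d2 a).items ∧
        (∀ p ∈ (pvA_frame gt d1 a).items,
          ∃ x y : Int, p.2 = [x, y] ∧ start0 ≤ x ∧ x ≤ y ∧ y ≤ a) := by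
      cases hg : gt.get? a with
      | none =>
        have hcg : gt.contains a = false := by
          rw [PySem.Dict.contains_eq_isSome_get?, hg]; rfl
        simp only [pvA_frame, pvB_frame, hg, hcg, if_false, Bool.false_eq_true]
        exact ⟨h0, h1, fun p hp => by
          obtain ⟨x, y, h⟩ := h2 p hp; exact ⟨x, y, h.1, h.2.1, h.2.2.1, by omega⟩⟩
      | some boxes =>
        have hcg : gt.contains a = true := by
          rw [PySem.Dict.contains_eq_isSome_get?, hg]; rfl
        have hgd : gt.getD a [] = boxes := PySem.Dict.getD_of_get?_eq_some gt [] hg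
        simp only [pvA_frame, pvB_frame, hg, hcg, if_true, hgd]
        exact pv_box_fold a start0 ha boxes d1 d2 h0 h1
          (fun p hp => by
            obtain ⟨x, y, h⟩ := h2 p hp; exact ⟨x, y, h.1, h.2.1, h.2.2.1, by omega⟩)
    have hrange : PySem.List.pyRange (a + 1) (a + ((k + 1 : Nat) : Int)) 1
        = PySem.List.pyRange (a + 1) ((a + 1) + (k : Int)) 1 := by
      congr 1
      push_cast
      ring
    rw [hrange]
    have hnext := ih (a + 1) (pvA_frame gt d1 a) (pvB_frame gt d2 a) (by omega) hstep.1 hstep.2.1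
      (fun p hp => by
        obtain ⟨x, y, h⟩ := hstep.2.2 p hp; exact ⟨x, y, h.1, h.2.1, h.2.2.1, by omega⟩)
    refine ⟨hnext.1, hnext.2.1, fun p hp => ?_⟩
    obtain ⟨x, y, h⟩ := hnext.2.2 p hp
    exact ⟨x, y, h.1, h.2.1, h.2.2.1, by push_cast at h ⊢; omega⟩

-- grouping loop: length of the list at key j counts the keys mapping to j
lemma pv_ftno_core (g : Int → Int) (ks : List Int) :
    ∀ (d : PySem.Dict Int (List Int)) (j : Int),
    ((ks.foldl (fun d o =>
        let f := g o
        if d.contains f then d.insert f (d.getD f [] ++ [o]) else d.insert f [o]) d).getD j []).length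
      = (d.getD j []).length + (ks.map g).count j := by
  induction ks with
  | nil => intro d j; simp
  | cons o ks ih =>
    intro d j
    simp only [List.foldl_cons, List.map_cons]
    have hstep : (let f := g o
        if d.contains f then d.insert f (d.getD f [] ++ [o]) else d.insert f [o])
        = d.modify (g o) [] (fun l => l ++ [o]) := by
      show (if d.contains (g o) then d.insert (g o) (d.getD (g o) [] ++ [o])
            else d.insert (g o) [o]) = _
      simp only [PySem.Dict.modify]
      split_ifs with h
      · rfl
      · rw [PySem.Dict.getD_of_not_contains d [] (by simpa using h)]
        rfl
    rw [hstep, ih]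
    by_cases hj : g o = j
    · have hcnt : (g o :: ks.map g).count j = (ks.map g).count j + 1 := by
        simp [hj]
      rw [hcnt, hj, PySem.Dict.getD_modify_self]
      simp only [List.length_append, List.length_cons, List.length_nil]
      omega
    · have hcnt : (g o :: ks.map g).count j = (ks.map g).count j := by
        simp [hj]
      rw [hcnt, PySem.Dict.getD_modify_of_ne d [] _ (Ne.symm hj)]

-- length of frame_to_new_obj[j] = number of objects whose recorded first frame is j
lemma pv_ftno_len (otfr : PySem.Dict Int (List Int)) (hn : otfr.keys.Nodup) (j : Int) :
    ((otfr.keys.foldl (fun d obj_id =>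
        let f := PySem.List.pyGetD (otfr.getD obj_id []) 0 0
        if d.contains f then d.insert f (d.getD f [] ++ [obj_id])
        else d.insert f [obj_id]) (PySem.Dict.empty : PySem.Dict Int (List Int))).getD j []).length
      = (otfr.items.map (fun p => PySem.List.pyGetD p.2 0 0)).count j := by
  have hcore := pv_ftno_core (fun o => PySem.List.pyGetD (otfr.getD o []) 0 0)
    otfr.keys PySem.Dict.empty j
  have hmap : otfr.keys.map (fun o => PySem.List.pyGetD (otfr.getD o []) 0 0)
      = otfr.items.map (fun p => PySem.List.pyGetD p.2 0 0) := by
    simp only [PySem.Dict.keys, List.map_map]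
    refine List.map_congr_left ?_
    intro p hp
    simp only [Function.comp_apply]
    congr 1
    exact PySem.Dict.getD_of_mem_items otfr hp hn []
  rw [hmap] at hcore
  simpa [PySem.Dict.getD_empty] using hcore

-- B's count array counts first frames
lemma pv_cnt_fold (start0 : Int) (vs : List Int) :
    ∀ (c : List Int),
    (∀ x ∈ vs, start0 ≤ x ∧ (x - start0).toNat < c.length) →
    ∀ k : Nat, k < c.length →
      PySem.List.pyGetD (vs.foldl (fun c f =>
          PySem.List.pySetD c (f - start0) (PySem.List.pyGetD c (f - start0) 0 + 1)) c) (k : Int) 0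
        = PySem.List.pyGetD c (k : Int) 0 + (vs.count (start0 + (k : Int)) : Int) := by
  induction vs with
  | nil => intro c _ k _; simp
  | cons v vs ih =>
    intro c hb k hk
    obtain ⟨hv1, hv2⟩ := hb v (List.mem_cons_self ..)
    simp only [List.foldl_cons]
    have hset : PySem.List.pySetD c (v - start0) (PySem.List.pyGetD c (v - start0) 0 + 1)
        = PySem.List.pySetD c (((v - start0).toNat : Nat) : Int)
            (PySem.List.pyGetD c (v - start0) 0 + 1) := by
      congr 1
      omega
    have hlen : (PySem.List.pySetD c (v - start0)
        (PySem.List.pyGetD c (v - start0) 0 + 1)).length = c.length :=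
      PySem.List.length_pySetD ..
    rw [ih _ (fun x hx => ⟨(hb x (List.mem_cons_of_mem _ hx)).1,
        by rw [hlen]; exact (hb x (List.mem_cons_of_mem _ hx)).2⟩) k (by rw [hlen]; exact hk)]
    rw [hset, PySem.List.pyGetD_pySetD_natCast c ((v - start0).toNat) k _ 0 hv2]
    by_cases he : v = start0 + (k : Int)
    · have hcnt : (v :: vs).count (start0 + (k : Int)) = vs.count (start0 + (k : Int)) + 1 := by
        simp [he]
      rw [hcnt, if_pos (by omega : k = (v - start0).toNat)]
      have h3 : PySem.List.pyGetD c (v - start0) 0 = PySem.List.pyGetD c (k : Int) 0 := by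
        congr 1
        omega
      rw [h3]
      push_cast
      ring
    · have hcnt : (v :: vs).count (start0 + (k : Int)) = vs.count (start0 + (k : Int)) := by
        simp [he]
      rw [hcnt, if_neg (by omega : ¬ k = (v - start0).toNat)]

-- the count pass preserves the array length
lemma pv_cnt_len (start0 : Int) (vs : List Int) :
    ∀ (c : List Int),
    (vs.foldl (fun c f =>
        PySem.List.pySetD c (f - start0) (PySem.List.pyGetD c (f - start0) 0 + 1)) c).length
      = c.length := by
  induction vs with
  | nil => intro c; rfl
  | cons v vs ih =>
    intro c
    simp only [List.foldl_cons]
    rw [ih]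
    exact PySem.List.length_pySetD ..

-- the prefix pass preserves the array length
lemma pv_pre_len (cnt : List Int) (l : List Int) :
    ∀ (p : List Int),
    (l.foldl (fun p k =>
        PySem.List.pySetD p (k + 1) (PySem.List.pyGetD p k 0 + PySem.List.pyGetD cnt k 0)) p).length
      = p.length := by
  induction l with
  | nil => intro p; rfl
  | cons a l ih =>
    intro p
    simp only [List.foldl_cons]
    rw [ih]
    exact PySem.List.length_pySetD ..

-- pyGetD on a replicate of zeros is zero
lemma pv_getD_repl (N k : Nat) :
    PySem.List.pyGetD (List.replicate N (0 : Int)) (k : Int) 0 = 0 := by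
  rw [PySem.List.pyGetD_natCast]
  by_cases h : k < N
  · rw [List.getD_replicate _ (by simpa using h)]
  · rw [List.getD_eq_default _ _ (by simp; omega)]

-- B's prefix array: pre[k] = sum of cnt[0..k)
lemma pv_pre_fold (cnt : List Int) :
    ∀ (m : Nat), m ≤ cnt.length →
    ∀ k : Nat, k ≤ m →
      PySem.List.pyGetD ((PySem.List.pyRange 0 (m : Int) 1).foldl (fun p k =>
          PySem.List.pySetD p (k + 1) (PySem.List.pyGetD p k 0 + PySem.List.pyGetD cnt k 0))
          (List.replicate (cnt.length + 1) (0 : Int))) (k : Int) 0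
        = ((List.range k).map (fun t : Nat => PySem.List.pyGetD cnt (t : Int) 0)).sum := by
  intro m
  induction m with
  | zero =>
    intro _ k hk
    have hk0 : k = 0 := by omega
    subst hk0
    rw [PySem.List.pyRange_one_eq_nil (by omega)]
    simpa using pv_getD_repl (cnt.length + 1) 0
  | succ m ih =>
    intro hm k hk
    have hm' : m ≤ cnt.length := by omega
    have hr : PySem.List.pyRange 0 ((m + 1 : Nat) : Int) 1
        = PySem.List.pyRange 0 (m : Int) 1 ++ [(m : Int)] := by
      push_cast
      exact PySem.List.pyRange_one_succ_right (by omega)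
    rw [hr, List.foldl_append, List.foldl_cons, List.foldl_nil]
    set P := (PySem.List.pyRange 0 (m : Int) 1).foldl (fun p k =>
        PySem.List.pySetD p (k + 1) (PySem.List.pyGetD p k 0 + PySem.List.pyGetD cnt k 0))
        (List.replicate (cnt.length + 1) (0 : Int)) with hP
    have hPlen : P.length = cnt.length + 1 := by
      rw [hP, pv_pre_len]
      exact List.length_replicate
    have hidx : ((m : Int) + 1) = (((m + 1 : Nat)) : Int) := by push_cast; ring
    rw [hidx, PySem.List.pyGetD_pySetD_natCast P (m + 1) k _ 0 (by rw [hPlen]; omega)]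
    by_cases hkm : k = m + 1
    · rw [if_pos hkm, ih hm' m (le_refl m), hkm, List.range_succ, List.map_append, List.sum_append]
      simp
    · rw [if_neg hkm]
      exact ih hm' k (by omega)

-- A's arrival_rate loop yields the (i, window-sum) pairs in range order
lemma pv_ar_items (start0 end0 fps : Int) (S : Int → Int) :
    ∀ (m : Nat),
    ((PySem.List.pyRange start0 (start0 + (m : Int)) 1).foldl (fun ar i =>
        let ar1 := if i > end0 - fps then ar.insert i (ar.getD (i - 1) 0) else ar
        ar1.insert i (S i)) (PySem.Dict.empty : PySem.Dict Int Int)).items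
      = (PySem.List.pyRange start0 (start0 + (m : Int)) 1).map (fun i => (i, S i)) := by
  intro m
  induction m with
  | zero =>
    rw [PySem.List.pyRange_one_eq_nil (by omega)]
    rfl
  | succ m ih =>
    have hr : PySem.List.pyRange start0 (start0 + ((m + 1 : Nat) : Int)) 1
        = PySem.List.pyRange start0 (start0 + (m : Int)) 1 ++ [start0 + (m : Int)] := by
      push_cast
      rw [show start0 + ((m : Int) + 1) = (start0 + (m : Int)) + 1 by ring]
      exact PySem.List.pyRange_one_succ_right (by omega)
    rw [hr, List.foldl_append, List.foldl_cons, List.foldl_nil, List.map_append]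
    set D := (PySem.List.pyRange start0 (start0 + (m : Int)) 1).foldl (fun ar i =>
        let ar1 := if i > end0 - fps then ar.insert i (ar.getD (i - 1) 0) else ar
        ar1.insert i (S i)) (PySem.Dict.empty : PySem.Dict Int Int) with hD
    have hcont : D.contains (start0 + (m : Int)) = false := by
      rw [PySem.Dict.contains_eq_decide_mem_keys]
      simp only [PySem.Dict.keys, ih, List.map_map, decide_eq_false_iff_not]
      intro hmem
      obtain ⟨j, hj, hje⟩ := List.mem_map.mp hmem
      have := (PySem.List.mem_pyRange_one.mp hj).2
      simp only [Function.comp_apply] at hje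
      omega
    simp only []
    split_ifs with hcase
    · rw [PySem.Dict.items_insert_of_contains _ _ (PySem.Dict.contains_insert_self ..),
        PySem.Dict.items_insert_of_not_contains _ _ hcont, List.map_append, ih, List.map_map]
      congr 1
      · refine List.map_congr_left ?_
        intro j hj
        have hne : j ≠ start0 + (m : Int) := by
          have := (PySem.List.mem_pyRange_one.mp hj).2
          omega
        simp [Function.comp, hne]
      · simp
    · rw [PySem.Dict.items_insert_of_not_contains _ _ hcont, ih]
      simp

-- the windowed sum equals a prefix difference, clamping the window at end0
lemma pv_window (start0 end0 fps : Int) (c : Int → Int) (P : Int → Int)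
    (hc0 : ∀ j, j < start0 ∨ end0 < j → c j = 0)
    (hP : ∀ u, start0 ≤ u → u ≤ end0 + 1 → P u = ((PySem.List.pyRange start0 u 1).map c).sum)
    (i : Int) (hi1 : start0 ≤ i) (hi2 : i ≤ end0) :
    ((PySem.List.pyRange i (i + fps) 1).map c).sum
      = P (max i (min (i + fps) (end0 + 1))) - P i := by
  by_cases hf : fps ≤ 0
  · rw [PySem.List.pyRange_one_eq_nil (by omega)]
    rw [max_eq_left (by omega : min (i + fps) (end0 + 1) ≤ i)]
    simp
  · rw [not_le] at hf
    have hih : i ≤ min (i + fps) (end0 + 1) := by omega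
    have hhe : min (i + fps) (end0 + 1) ≤ end0 + 1 := by omega
    have hhf : min (i + fps) (end0 + 1) ≤ i + fps := by omega
    rw [max_eq_right hih]
    rw [PySem.List.pyRange_one_append i (min (i + fps) (end0 + 1)) (i + fps) hih hhf,
      List.map_append, List.sum_append]
    have hzero : ((PySem.List.pyRange (min (i + fps) (end0 + 1)) (i + fps) 1).map c).sum = 0 := by
      apply List.sum_eq_zero
      intro x hx
      obtain ⟨j, hj, rfl⟩ := List.mem_map.mp hx
      have hjm := PySem.List.mem_pyRange_one.mp hj
      apply hc0
      right
      omega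
    rw [hzero, add_zero, hP (min (i + fps) (end0 + 1)) (by omega) hhe, hP i hi1 (by omega),
      PySem.List.pyRange_one_append start0 i (min (i + fps) (end0 + 1)) hi1 hih,
      List.map_append, List.sum_append]
    ring

-- ===== VERDICT (by name: the statement is the Claim_ definition above) =====
theorem compute_arrival_rate_spec : Claim_equal_compute_arrival_rate := by
  intro vd start end_ fps _ hpre
  unfold Spec_compute_arrival_rate
  by_cases hse : start > end_
  · simp only [compute_arrival_rate, compute_arrival_rate_alt, if_pos hse]
    simp only [PySem.List.pyRange_one_eq_nil (by omega : end_ + 1 ≤ start)]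
    rfl
  · have hle : start ≤ end_ := by omega
    simp only [compute_arrival_rate, compute_arrival_rate_alt, if_neg hse]
    set gt := PySem.Dict.ofList vd with hgt
    set otfr := (PySem.List.pyRange start (end_ + 1) 1).foldl (pvA_frame gt) PySem.Dict.empty
      with hotfr
    set FT := otfr.keys.foldl (fun d obj_id =>
        let f := PySem.List.pyGetD (otfr.getD obj_id []) 0 0
        if d.contains f then d.insert f (d.getD f [] ++ [obj_id])
        else d.insert f [obj_id]) (PySem.Dict.empty : PySem.Dict Int (List Int)) with hFT
    set fsd := (PySem.List.pyRange start (end_ + 1) 1).foldl (pvB_frame gt) PySem.Dict.empty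
      with hfsd
    set CNT := fsd.values.foldl (fun c f =>
        PySem.List.pySetD c (f - start) (PySem.List.pyGetD c (f - start) 0 + 1))
        (List.replicate (end_ - start + 1).toNat (0 : Int)) with hCNTdef
    set PRE := (PySem.List.pyRange 0 (end_ - start + 1) 1).foldl (fun p k =>
        PySem.List.pySetD p (k + 1) (PySem.List.pyGetD p k 0 + PySem.List.pyGetD CNT k 0))
        (List.replicate (end_ - start + 1 + 1).toNat (0 : Int)) with hPREdef
    -- the frame scan: A's obj_to_frame_range projects onto B's first_seen
    set k := (end_ + 1 - start).toNat with hkdef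
    have hk' : start + (k : Int) = end_ + 1 := by omega
    have hframes := pv_frames_fold gt start k start PySem.Dict.empty PySem.Dict.empty
      (le_refl start) (by rw [PySem.Dict.keys_empty]; exact List.nodup_nil) rfl
      (by intro p hp
          rw [show (PySem.Dict.empty : PySem.Dict Int (List Int)).items = [] from rfl] at hp
          cases hp)
    rw [hk'] at hframes
    rw [← hotfr, ← hfsd] at hframes
    obtain ⟨hnod, hproj, hvals⟩ := hframes
    set F := otfr.items.map (fun p => PySem.List.pyGetD p.2 0 0) with hF
    have hFvals : ∀ x ∈ F, start ≤ x ∧ x ≤ end_ := by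
      intro x hx
      rw [hF] at hx
      obtain ⟨p, hp, hpe⟩ := List.mem_map.mp hx
      obtain ⟨a, b, hab, ha1, ha2, ha3⟩ := hvals p hp
      rw [hab] at hpe
      have : PySem.List.pyGetD [a, b] 0 0 = a := rfl
      rw [this] at hpe
      omega
    have hFv : fsd.values = F := by
      show fsd.items.map (fun x => x.2) = F
      rw [← hproj, List.map_map, hF]
      rfl
    -- frame_to_new_obj lengths are first-frame counts
    have hcj : ∀ j, (FT.getD j []).length = F.count j := by
      intro j
      rw [hFT, hF]
      exact pv_ftno_len otfr hnod j
    -- the count array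
    have hCNT : CNT = F.foldl (fun c f =>
        PySem.List.pySetD c (f - start) (PySem.List.pyGetD c (f - start) 0 + 1))
        (List.replicate (end_ - start + 1).toNat (0 : Int)) := by
      rw [hCNTdef, hFv]
    have hCNTlen : CNT.length = (end_ - start + 1).toNat := by
      rw [hCNT, pv_cnt_len]
      exact List.length_replicate
    have hCNTget : ∀ t : Nat, t < (end_ - start + 1).toNat →
        PySem.List.pyGetD CNT (t : Int) 0 = (F.count (start + (t : Int)) : Int) := by
      intro t ht
      rw [hCNT, pv_cnt_fold start F (List.replicate (end_ - start + 1).toNat 0)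
        (fun x hx => ⟨(hFvals x hx).1, by
          have := hFvals x hx
          simp only [List.length_replicate]
          omega⟩) t (by simpa using ht)]
      rw [pv_getD_repl]
      ring
    -- the prefix array
    have hPget : ∀ k' : Nat, k' ≤ (end_ - start + 1).toNat →
        PySem.List.pyGetD PRE (k' : Int) 0
          = ((List.range k').map (fun t : Nat => PySem.List.pyGetD CNT (t : Int) 0)).sum := by
      intro k' hk'
      have em : (((end_ - start + 1).toNat : Nat) : Int) = end_ - start + 1 := by omega
      have e2 : CNT.length + 1 = (end_ - start + 1 + 1).toNat := by rw [hCNTlen]; omega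
      have h := pv_pre_fold CNT (end_ - start + 1).toNat (by rw [hCNTlen]) k' hk'
      rw [em, e2] at h
      rw [hPREdef]
      exact h
    -- prefix values are windowed-count sums
    have hPfun : ∀ u, start ≤ u → u ≤ end_ + 1 →
        PySem.List.pyGetD PRE (u - start) 0
          = ((PySem.List.pyRange start u 1).map (fun j => (F.count j : Int))).sum := by
      intro u hu1 hu2
      have hu : u - start = (((u - start).toNat : Nat) : Int) := by omega
      rw [hu, hPget (u - start).toNat (by omega), PySem.List.pyRange_one, List.map_map]
      refine congrArg List.sum (List.map_congr_left ?_)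
      intro t ht
      have ht' : t < (end_ - start + 1).toNat := by
        rw [List.mem_range] at ht
        omega
      simp only [Function.comp_apply]
      rw [hCNTget t ht']
    -- zero outside the frame span
    have hc0 : ∀ j, j < start ∨ end_ < j → ((F.count j : Nat) : Int) = 0 := by
      intro j hj
      have hnm : j ∉ F := fun hmem => by have := hFvals j hmem; omega
      rw [List.count_eq_zero.mpr hnm]
      rfl
    -- A's arrival dict as an association list
    set Sfun : Int → Int := fun i => (PySem.List.pyRange i (i + fps) 1).foldl (fun acc j =>
        match FT.get? j with
        | none => acc
        | some l => acc + PySem.List.len l) 0 with hSfun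
    have hSapp : ∀ i, Sfun i = (PySem.List.pyRange i (i + fps) 1).foldl (fun acc j =>
        match FT.get? j with
        | none => acc
        | some l => acc + PySem.List.len l) 0 := fun _ => rfl
    have hA : (List.foldl (fun ar i =>
          let ar1 := if i > end_ - fps then ar.insert i (ar.getD (i - 1) 0) else ar
          let s := (PySem.List.pyRange i (i + fps) 1).foldl (fun acc j =>
              match FT.get? j with
              | none => acc
              | some l => acc + PySem.List.len l) 0
          ar1.insert i s) (PySem.Dict.empty : PySem.Dict Int Int)
          (PySem.List.pyRange start (end_ + 1) 1)).items
        = (PySem.List.pyRange start (end_ + 1) 1).map (fun i => (i, Sfun i)) := by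
      rw [← hk']
      exact pv_ar_items start end_ fps Sfun k
    rw [hA]
    refine List.map_congr_left ?_
    intro i hi
    obtain ⟨hi1, hi2⟩ := PySem.List.mem_pyRange_one.mp hi
    have hi2' : i ≤ end_ := by omega
    -- the window sum for frame i
    have hSi : Sfun i
        = ((PySem.List.pyRange i (i + fps) 1).map (fun j => ((F.count j : Nat) : Int))).sum := by
      rw [hSapp i, PySem.List.foldl_congr_mem (PySem.List.pyRange i (i + fps) 1) _
        (fun acc j => acc + ((F.count j : Nat) : Int)) 0 ?_]
      · rw [PySem.List.foldl_add]
        simp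
      · intro acc j _
        cases hgj : FT.get? j with
        | none =>
          have h1 : FT.getD j [] = [] := by
            rw [PySem.Dict.getD_eq_get?_getD, hgj]
            rfl
          have h2 := hcj j
          rw [h1] at h2
          simp only [List.length_nil] at h2
          simp [← h2]
        | some l =>
          have h1 : FT.getD j [] = l := PySem.Dict.getD_of_get?_eq_some FT [] hgj
          have h2 := hcj j
          rw [h1] at h2
          simp only [PySem.List.len_eq, h2]
    have hwin := pv_window start end_ fps (fun j => ((F.count j : Nat) : Int))
      (fun u => PySem.List.pyGetD PRE (u - start) 0) hc0 hPfun i hi1 hi2'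
    exact congrArg (Prod.mk i) ((hSi.trans hwin))
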